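-- pv_equiv track=rewrite | github.com/b-zhu524/usaco_practice | block_game/blocks.py | solve_dict
-- ===== SOURCE A (Python) =====
-- def count_letters_dict(word):
-- 	alpha_dict = {}
-- 	for letter in word:
-- 		key = ord(letter) - ord("a")
-- 		if key in alpha_dict:
-- 			alpha_dict[key] += 1
-- 		else:
-- 			alpha_dict[key] = 1
-- 	return alpha_dict
--
-- def get_max_count(dict1, dict2, key):
-- 	count = 0
-- 	if key in dict1:
-- 		count = max(count, dict1[key])
-- 	if key in dict2:
-- 		count = max(count, dict2[key])
-- 	return count
--
-- def solve_dict(boards):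
-- 	alpha_counter = [0] * 26
-- 	for word1, word2 in boards:
-- 		counter1 = count_letters_dict(word1)
-- 		counter2 = count_letters_dict(word2)
-- 		for i in range(26):
-- 			alpha_counter[i] += get_max_count(counter1, counter2, i)
-- 	return alpha_counter
-- ===== SOURCE B (Python) =====
-- def solve_dict(boards):
-- 	res = [0] * 26
-- 	for w1, w2 in boards:
-- 		rem = [0] * 26
-- 		for ch in w1:
-- 			k = ord(ch) - ord("a")
-- 			if 0 <= k < 26:
-- 				res[k] += 1
-- 				rem[k] += 1
-- 		for ch in w2:
-- 			k = ord(ch) - ord("a")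
-- 			if 0 <= k < 26:
-- 				if rem[k] > 0:
-- 					rem[k] -= 1
-- 				else:
-- 					res[k] += 1
-- 	return res
-- ===== Notes on version B (the rewrite author's own statement) =====
-- stated objective: alternative
-- what changed: Removed the max computation entirely: B counts w1's letters straight into the result array, then streams w2's letters, consuming matches from a copy of w1's counts and adding only the excess (max(a,b) = a + (b-a)+), so the per-board 26-key loop, the two dicts and the get_max_count helper disappear.
import Mathlib
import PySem

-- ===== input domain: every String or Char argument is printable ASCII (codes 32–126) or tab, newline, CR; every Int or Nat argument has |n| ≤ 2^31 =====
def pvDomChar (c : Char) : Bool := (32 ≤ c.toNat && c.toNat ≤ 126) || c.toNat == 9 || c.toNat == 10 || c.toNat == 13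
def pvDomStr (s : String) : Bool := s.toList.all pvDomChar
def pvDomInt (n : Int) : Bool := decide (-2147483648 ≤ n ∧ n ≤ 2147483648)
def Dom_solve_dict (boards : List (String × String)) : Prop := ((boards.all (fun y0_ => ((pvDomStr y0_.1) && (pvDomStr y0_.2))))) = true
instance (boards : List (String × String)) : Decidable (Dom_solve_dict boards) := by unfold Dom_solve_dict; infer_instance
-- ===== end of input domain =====

-- B drops A's per-board dicts, 26-key loop and max: it counts w1 into the result and streams w2,
-- consuming matches from w1's counts and adding only the excess; same value (objective: alternative).

-- ===== PORT A =====
def count_letters_dict (word : String) : PySem.Dict Int Int :=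
  word.toList.foldl (fun alpha_dict letter =>
    let key : Int := (letter.toNat : Int) - 97
    if alpha_dict.contains key then alpha_dict.insert key (alpha_dict.getD key 0 + 1)
    else alpha_dict.insert key 1) PySem.Dict.empty

def get_max_count (dict1 dict2 : PySem.Dict Int Int) (key : Int) : Int :=
  let count : Int := 0
  let count := if dict1.contains key then max count (dict1.getD key 0) else count
  let count := if dict2.contains key then max count (dict2.getD key 0) else count
  count

def solve_dict (boards : List (String × String)) : List Int :=
  boards.foldl (fun alpha_counter b =>
    let counter1 := count_letters_dict b.1
    let counter2 := count_letters_dict b.2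
    (List.range 26).foldl
      (fun a i => a.set i (a[i]! + get_max_count counter1 counter2 (i : Int))) alpha_counter)
    (List.replicate 26 (0 : Int))

-- ===== PORT B =====
def solve_dict_alt (boards : List (String × String)) : List Int :=
  boards.foldl (fun res b =>
    let p := b.1.toList.foldl (fun (p : List Int × List Int) ch =>
        let k : Int := (ch.toNat : Int) - 97
        if 0 ≤ k ∧ k < 26 then
          (p.1.set k.toNat (p.1[k.toNat]! + 1), p.2.set k.toNat (p.2[k.toNat]! + 1))
        else p) (res, List.replicate 26 (0 : Int))
    (b.2.toList.foldl (fun (p : List Int × List Int) ch =>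
        let k : Int := (ch.toNat : Int) - 97
        if 0 ≤ k ∧ k < 26 then
          if p.2[k.toNat]! > 0 then (p.1, p.2.set k.toNat (p.2[k.toNat]! - 1))
          else (p.1.set k.toNat (p.1[k.toNat]! + 1), p.2)
        else p) p).1) (List.replicate 26 (0 : Int))

-- ===== PRECONDITION & SPEC =====
def Spec_solve_dict (boards : List (String × String)) (out : List Int) : Prop := out = solve_dict_alt boards
instance (boards : List (String × String)) (out : List Int) : Decidable (Spec_solve_dict boards out) := by unfold Spec_solve_dict; infer_instance

-- ===== CLAIM (what is proved, stated in full; the proofs are below) =====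
def Claim_equal_solve_dict : Prop := ∀ (boards : List (String × String)), Dom_solve_dict boards → Spec_solve_dict boards (solve_dict boards)

-- ===== LEMMAS AND PROOFS =====

def cntL (l : List Char) (j : Nat) : Int := (l.countP (fun c => (c.toNat : Int) - 97 == (j : Int)) : Int)

lemma cntL_nonneg (l : List Char) (j : Nat) : 0 ≤ cntL l j := Int.natCast_nonneg _

lemma cntL_cons (c : Char) (t : List Char) (j : Nat) :
    cntL (c :: t) j = cntL t j + (if ((c.toNat : Int) - 97 == (j : Int)) then 1 else 0) := by
  unfold cntL
  rw [List.countP_cons]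
  split <;> push_cast <;> ring

lemma set_get26 (a : List Int) (ha : a.length = 26) (m j : Nat) (_hm : m < 26) (hj : j < 26) (v : Int) :
    (a.set m v)[j]! = if m = j then v else a[j]! := by
  have h1 : j < (a.set m v).length := by simp [ha]; omega
  rw [getElem!_pos _ j h1, List.getElem_set]
  split
  · rfl
  · rw [getElem!_pos a j (by omega)]

-- A-side lemmas

lemma getD_not_contains (d : PySem.Dict Int Int) (k : Int) (h : d.contains k = false) :
    d.getD k 0 = 0 := by
  have := (PySem.Dict.get?_eq_none_iff_contains d k).mpr h
  simp [PySem.Dict.getD, this]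

lemma getD_count_fold (k : Int) (l : List Char) : ∀ (d : PySem.Dict Int Int),
    (l.foldl (fun alpha_dict letter =>
      let key : Int := (letter.toNat : Int) - 97
      if alpha_dict.contains key then alpha_dict.insert key (alpha_dict.getD key 0 + 1)
      else alpha_dict.insert key 1) d).getD k 0
    = d.getD k 0 + (l.countP (fun c => (c.toNat : Int) - 97 == k) : Int) := by
  induction l with
  | nil => simp
  | cons c t ih =>
    intro d
    simp only [List.foldl_cons, List.countP_cons, ih]
    have hstep : ((if d.contains ((c.toNat : Int) - 97) then d.insert ((c.toNat : Int) - 97) (d.getD ((c.toNat : Int) - 97) 0 + 1)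
        else d.insert ((c.toNat : Int) - 97) 1)).getD k 0
        = d.getD k 0 + (if ((c.toNat : Int) - 97 == k) then 1 else 0) := by
      by_cases hk : (c.toNat : Int) - 97 = k
      · subst hk
        simp only [beq_self_eq_true, if_pos]
        cases hc : d.contains ((c.toNat : Int) - 97) with
        | true => simp [PySem.Dict.getD_insert_self]
        | false => simp [PySem.Dict.getD_insert_self, getD_not_contains d _ hc]
      · have hne : k ≠ (c.toNat : Int) - 97 := Ne.symm hk
        have hb : ((c.toNat : Int) - 97 == k) = false := by simp [hk]
        cases hc : d.contains ((c.toNat : Int) - 97) with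
        | true => simp [hb, PySem.Dict.getD_insert_of_ne _ _ _ hne]
        | false => simp [hb, PySem.Dict.getD_insert_of_ne _ _ _ hne]
    rw [hstep]; push_cast; ring

lemma getD_count_letters (w : String) (k : Int) :
    (count_letters_dict w).getD k 0 = (w.toList.countP (fun c => (c.toNat : Int) - 97 == k) : Int) := by
  unfold count_letters_dict
  rw [getD_count_fold]
  simp [PySem.Dict.getD, PySem.Dict.empty, PySem.Dict.get?]

lemma get_max_count_eq (w1 w2 : String) (j : Nat) :
    get_max_count (count_letters_dict w1) (count_letters_dict w2) (j : Int)
    = max (cntL w1.toList j) (cntL w2.toList j) := by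
  have h1 := getD_count_letters w1 (j : Int)
  have h2 := getD_count_letters w2 (j : Int)
  have n1 : (0 : Int) ≤ cntL w1.toList j := cntL_nonneg _ _
  have n2 : (0 : Int) ≤ cntL w2.toList j := cntL_nonneg _ _
  unfold get_max_count
  unfold cntL at *
  cases hc1 : (count_letters_dict w1).contains (j : Int) with
  | true =>
    cases hc2 : (count_letters_dict w2).contains (j : Int) with
    | true =>
      simp only [if_pos, h1, h2]
      rw [max_eq_right n1]
    | false =>
      have hz2 : ((w2.toList.countP (fun c => (c.toNat : Int) - 97 == (j : Int)) : Int)) = 0 := by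
        rw [← h2]; exact getD_not_contains _ _ hc2
      simp only [Bool.false_eq_true, if_false, if_pos, h1, hz2]
      rw [max_eq_right n1, max_eq_left n1]
  | false =>
    have hz1 : ((w1.toList.countP (fun c => (c.toNat : Int) - 97 == (j : Int)) : Int)) = 0 := by
      rw [← h1]; exact getD_not_contains _ _ hc1
    cases hc2 : (count_letters_dict w2).contains (j : Int) with
    | true =>
      simp only [Bool.false_eq_true, if_false, if_pos, h2, hz1]
    | false =>
      have hz2 : ((w2.toList.countP (fun c => (c.toNat : Int) - 97 == (j : Int)) : Int)) = 0 := by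
        rw [← h2]; exact getD_not_contains _ _ hc2
      simp [hz1, hz2]

lemma range_set_fold (f : Nat → Int) (n : Nat) : ∀ (a : List Int), n ≤ a.length →
    (List.range n).foldl (fun a i => a.set i (a[i]! + f i)) a
    = (List.range n).map (fun j => a[j]! + f j) ++ a.drop n := by
  induction n with
  | zero => simp
  | succ n ih =>
    intro a h
    rw [List.range_succ, List.foldl_append, List.foldl_cons, List.foldl_nil, ih a (by omega)]
    have hlen : ((List.range n).map (fun j => a[j]! + f j)).length = n := by simp
    have hn : n < a.length := by omega
    have hdrop : a.drop n = a[n] :: a.drop (n + 1) := List.drop_eq_getElem_cons hn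
    have hget : ((List.range n).map (fun j => a[j]! + f j) ++ a.drop n)[n]! = a[n]! := by
      have hlt : n < ((List.range n).map (fun j => a[j]! + f j) ++ a.drop n).length := by
        simp; omega
      rw [getElem!_pos _ n hlt, List.getElem_append_right (by omega)]
      simp only [hlen, Nat.sub_self, List.getElem_drop]
      simp [getElem!_pos a n hn]
    rw [hget, hdrop, List.set_append_right _ _ (by omega), hlen]
    rw [Nat.sub_self, List.set_cons_zero]
    simp [List.map_append]

lemma boards_fold (g : String × String → Nat → Int) (boards : List (String × String)) :
    ∀ (a : List Int), a.length = 26 →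
    boards.foldl (fun alpha_counter b =>
      (List.range 26).foldl (fun a i => a.set i (a[i]! + g b i)) alpha_counter) a
    = (List.range 26).map (fun (j : Nat) => a[j]! + (boards.map (fun b => g b j)).sum) := by
  induction boards with
  | nil =>
    intro a ha
    simp only [List.foldl_nil, List.map_nil, List.sum_nil, add_zero]
    apply List.ext_getElem (by simp [ha])
    intro i h1 h2
    simp [List.getElem?_eq_getElem h1]
  | cons b t ih =>
    intro a ha
    rw [List.foldl_cons, range_set_fold (g b) 26 a (by omega)]
    have hd : a.drop 26 = [] := by rw [List.drop_eq_nil_iff]; omega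
    rw [hd, List.append_nil, ih _ (by simp)]
    apply List.map_congr_left
    intro j hj
    have hj26 : j < 26 := by simpa using hj
    have hg : ((List.range 26).map (fun (i : Nat) => a[i]! + g b i))[j]! = a[j]! + g b j := by
      rw [getElem!_pos _ j (by simp [hj26]), List.getElem_map, List.getElem_range]
    rw [hg]
    simp [add_assoc]

-- B-side lemmas

lemma pass1 (l : List Char) : ∀ (res rem : List Int), res.length = 26 → rem.length = 26 →
    (let q := l.foldl (fun (p : List Int × List Int) ch =>
        let k : Int := (ch.toNat : Int) - 97
        if 0 ≤ k ∧ k < 26 then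
          (p.1.set k.toNat (p.1[k.toNat]! + 1), p.2.set k.toNat (p.2[k.toNat]! + 1))
        else p) (res, rem)
     q.1.length = 26 ∧ q.2.length = 26 ∧
       ∀ j : Nat, j < 26 → q.1[j]! = res[j]! + cntL l j ∧ q.2[j]! = rem[j]! + cntL l j) := by
  induction l with
  | nil => intro res rem h1 h2; exact ⟨h1, h2, fun j hj => by simp [cntL]⟩
  | cons c t ih =>
    intro res rem h1 h2
    simp only [List.foldl_cons]
    by_cases hg : 0 ≤ (c.toNat : Int) - 97 ∧ (c.toNat : Int) - 97 < 26
    · have hm : ((c.toNat : Int) - 97).toNat < 26 := by omega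
      have hc : (c.toNat : Int) - 97 = (((c.toNat : Int) - 97).toNat : Int) := by omega
      simp only [if_pos hg]
      obtain ⟨q1, q2, q3⟩ := ih (res.set ((c.toNat : Int) - 97).toNat (res[((c.toNat : Int) - 97).toNat]! + 1))
        (rem.set ((c.toNat : Int) - 97).toNat (rem[((c.toNat : Int) - 97).toNat]! + 1))
        (by simp [h1]) (by simp [h2])
      refine ⟨q1, q2, fun j hj => ?_⟩
      obtain ⟨e1, e2⟩ := q3 j hj
      rw [e1, e2, set_get26 res h1 _ j hm hj, set_get26 rem h2 _ j hm hj, cntL_cons]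
      by_cases hjm : ((c.toNat : Int) - 97).toNat = j
      · have : ((c.toNat : Int) - 97 == (j : Int)) = true := by
          simp only [beq_iff_eq]; omega
        subst hjm
        simp only [this, if_true]
        constructor <;> ring
      · have : ((c.toNat : Int) - 97 == (j : Int)) = false := by
          simp only [beq_eq_false_iff_ne, ne_eq]; omega
        simp [hjm, this]
    · simp only [if_neg hg]
      obtain ⟨q1, q2, q3⟩ := ih res rem h1 h2
      refine ⟨q1, q2, fun j hj => ?_⟩
      obtain ⟨e1, e2⟩ := q3 j hj
      have : ((c.toNat : Int) - 97 == (j : Int)) = false := by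
        simp only [beq_eq_false_iff_ne, ne_eq]; omega
      rw [e1, e2, cntL_cons, this]
      simp

lemma pass2 (l : List Char) : ∀ (res rem : List Int), res.length = 26 → rem.length = 26 →
    (∀ j : Nat, j < 26 → 0 ≤ rem[j]!) →
    (let q := l.foldl (fun (p : List Int × List Int) ch =>
        let k : Int := (ch.toNat : Int) - 97
        if 0 ≤ k ∧ k < 26 then
          if p.2[k.toNat]! > 0 then (p.1, p.2.set k.toNat (p.2[k.toNat]! - 1))
          else (p.1.set k.toNat (p.1[k.toNat]! + 1), p.2)
        else p) (res, rem)
     q.1.length = 26 ∧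
       ∀ j : Nat, j < 26 → q.1[j]! = res[j]! + max 0 (cntL l j - rem[j]!)) := by
  induction l with
  | nil =>
    intro res rem h1 h2 hn
    simp only [List.foldl_nil]
    refine ⟨h1, fun j hj => ?_⟩
    have hc0 : cntL [] j = 0 := by simp [cntL]
    rw [hc0]
    have := hn j hj
    omega
  | cons c t ih =>
    intro res rem h1 h2 hn
    simp only [List.foldl_cons]
    by_cases hg : 0 ≤ (c.toNat : Int) - 97 ∧ (c.toNat : Int) - 97 < 26
    · have hm : ((c.toNat : Int) - 97).toNat < 26 := by omega
      have hpred : ∀ j : Nat, j < 26 →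
          (((c.toNat : Int) - 97 == (j : Int)) = true ↔ ((c.toNat : Int) - 97).toNat = j) := by
        intro j hj; simp only [beq_iff_eq]; omega
      simp only [if_pos hg]
      by_cases hrm : rem[((c.toNat : Int) - 97).toNat]! > 0
      · simp only [if_pos hrm]
        obtain ⟨q1, q3⟩ := ih res (rem.set ((c.toNat : Int) - 97).toNat (rem[((c.toNat : Int) - 97).toNat]! - 1))
          h1 (by simp [h2])
          (by intro j hj
              rw [set_get26 rem h2 _ j hm hj]
              split
              · omega
              · exact hn j hj)
        refine ⟨q1, fun j hj => ?_⟩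
        rw [q3 j hj, set_get26 rem h2 _ j hm hj, cntL_cons]
        by_cases hjm : ((c.toNat : Int) - 97).toNat = j
        · subst hjm
          have hp : ((c.toNat : Int) - 97 == ((((c.toNat : Int) - 97).toNat : Nat) : Int)) = true :=
            (hpred _ hj).mpr rfl
          simp only [hp, if_true]
          congr 1
          omega
        · have hp : ((c.toNat : Int) - 97 == (j : Int)) = false := by
            rw [Bool.eq_false_iff]
            intro h; exact hjm ((hpred j hj).mp h)
          simp [hjm, hp]
      · simp only [if_neg hrm]
        obtain ⟨q1, q3⟩ := ih (res.set ((c.toNat : Int) - 97).toNat (res[((c.toNat : Int) - 97).toNat]! + 1))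
          rem (by simp [h1]) h2 hn
        refine ⟨q1, fun j hj => ?_⟩
        rw [q3 j hj, set_get26 res h1 _ j hm hj, cntL_cons]
        by_cases hjm : ((c.toNat : Int) - 97).toNat = j
        · subst hjm
          have hp : ((c.toNat : Int) - 97 == ((((c.toNat : Int) - 97).toNat : Nat) : Int)) = true :=
            (hpred _ hj).mpr rfl
          have hz : rem[(((c.toNat : Int) - 97).toNat : Nat)]! = 0 := by
            have := hn _ hj
            omega
          have hcn := cntL_nonneg t (((c.toNat : Int) - 97).toNat)
          simp only [hp, if_true, hz]
          omega
        · have hp : ((c.toNat : Int) - 97 == (j : Int)) = false := by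
            rw [Bool.eq_false_iff]
            intro h; exact hjm ((hpred j hj).mp h)
          simp [hjm, hp]
    · simp only [if_neg hg]
      obtain ⟨q1, q3⟩ := ih res rem h1 h2 hn
      refine ⟨q1, fun j hj => ?_⟩
      have hp : ((c.toNat : Int) - 97 == (j : Int)) = false := by
        simp only [beq_eq_false_iff_ne, ne_eq]; omega
      rw [q3 j hj, cntL_cons, hp]
      simp

lemma alt_fold (boards : List (String × String)) : ∀ (res : List Int), res.length = 26 →
    (let q := boards.foldl (fun res b =>
        let p := b.1.toList.foldl (fun (p : List Int × List Int) ch =>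
            let k : Int := (ch.toNat : Int) - 97
            if 0 ≤ k ∧ k < 26 then
              (p.1.set k.toNat (p.1[k.toNat]! + 1), p.2.set k.toNat (p.2[k.toNat]! + 1))
            else p) (res, List.replicate 26 (0 : Int))
        (b.2.toList.foldl (fun (p : List Int × List Int) ch =>
            let k : Int := (ch.toNat : Int) - 97
            if 0 ≤ k ∧ k < 26 then
              if p.2[k.toNat]! > 0 then (p.1, p.2.set k.toNat (p.2[k.toNat]! - 1))
              else (p.1.set k.toNat (p.1[k.toNat]! + 1), p.2)
            else p) p).1) res
     q.length = 26 ∧ ∀ j : Nat, j < 26 →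
       q[j]! = res[j]! + (boards.map (fun b => max (cntL b.1.toList j) (cntL b.2.toList j))).sum) := by
  induction boards with
  | nil => intro res h1; exact ⟨h1, fun j hj => by simp⟩
  | cons b t ih =>
    intro res h1
    simp only [List.foldl_cons]
    have hrep : ∀ j : Nat, j < 26 → (List.replicate 26 (0 : Int))[j]! = 0 := by
      intro j hj
      rw [getElem!_pos _ j (by simp [hj]), List.getElem_replicate]
    obtain ⟨p1, p2, p3⟩ := pass1 b.1.toList res (List.replicate 26 (0 : Int)) h1 (by simp)
    obtain ⟨w1, w3⟩ := pass2 b.2.toList _ _ p1 p2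
      (by intro j hj
          obtain ⟨_, e2⟩ := p3 j hj
          rw [e2, hrep j hj]
          have := cntL_nonneg b.1.toList j
          omega)
    obtain ⟨q1, q3⟩ := ih _ w1
    refine ⟨q1, fun j hj => ?_⟩
    rw [q3 j hj, w3 j hj]
    obtain ⟨e1, e2⟩ := p3 j hj
    rw [e1, e2, hrep j hj, List.map_cons, List.sum_cons]
    have := cntL_nonneg b.1.toList j
    have := cntL_nonneg b.2.toList j
    have hmx : cntL b.1.toList j + max 0 (cntL b.2.toList j - (0 + cntL b.1.toList j))
        = max (cntL b.1.toList j) (cntL b.2.toList j) := by omega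
    omega

set_option maxHeartbeats 1000000 in
-- ===== VERDICT (by name: the statement is the Claim_ definition above) =====
theorem solve_dict_spec : Claim_equal_solve_dict := by
  intro boards _
  unfold Spec_solve_dict
  have hA : solve_dict boards = (List.range 26).map (fun (j : Nat) =>
      (List.replicate 26 (0 : Int))[j]! +
      (boards.map (fun b => get_max_count (count_letters_dict b.1) (count_letters_dict b.2) (j : Int))).sum) :=
    boards_fold _ boards _ (by simp)
  obtain ⟨q1, q3⟩ := alt_fold boards (List.replicate 26 (0 : Int)) (by simp)
  have hlenA : (solve_dict boards).length = 26 := by rw [hA]; simp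
  apply List.ext_getElem (by rw [hlenA]; exact q1.symm)
  intro j hjl hjr
  have hj : j < 26 := by rw [hlenA] at hjl; exact hjl
  have hrep : (List.replicate 26 (0 : Int))[j]! = 0 := by
    rw [getElem!_pos _ j (by simp [hj]), List.getElem_replicate]
  have hBj : (solve_dict_alt boards)[j]! = (boards.map (fun b => max (cntL b.1.toList j) (cntL b.2.toList j))).sum := by
    have := q3 j hj
    rw [hrep, zero_add] at this
    exact this
  have hAj : (solve_dict boards)[j]! = (boards.map (fun b => max (cntL b.1.toList j) (cntL b.2.toList j))).sum := by
    rw [hA, getElem!_pos _ j (by simp [hj])]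
    simp only [List.getElem_map, List.getElem_range, hrep, zero_add]
    congr 1
    apply List.map_congr_left
    intro b _
    exact get_max_count_eq b.1 b.2 _
  rw [← getElem!_pos (solve_dict boards) j hjl, hAj, ← hBj, getElem!_pos _ j hjr]
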